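-- pv_equiv track=rewrite | github.com/mistakeknot/tldr-swinton | src/tldr_swinton/modules/core/engines/difflens.py | _split_blocks_by_indent
-- ===== SOURCE A (Python) =====
-- def _split_blocks_by_indent(lines: list[str]) -> list[tuple[int, int]]:
--     """Split code into blocks at indentation-level transitions.
--
--     Detects block boundaries where indentation level changes, which captures
--     structural boundaries (function bodies, if/else branches, loops) better
--     than blank-line splitting. Inspired by LongCodeZip (ASE 2025).
--     """
--     if not lines:
--         return [(0, 0)]
--
--     blocks: list[tuple[int, int]] = []
--     start = 0
--
--     def _indent_level(line: str) -> int | None: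
--         stripped = line.lstrip()
--         if not stripped:
--             return None  # blank line - no indent signal
--         return len(line) - len(stripped)
--
--     prev_indent = _indent_level(lines[0])
--
--     for idx in range(len(lines)):
--         stripped = lines[idx].strip()
--         if stripped == "" or stripped == "...":
--             if start < idx:
--                 blocks.append((start, idx - 1))
--             start = idx + 1
--             prev_indent = None
--             continue
--
--         cur_indent = _indent_level(lines[idx])
--         if cur_indent is None:
--             continue
--
--         # Block boundary: indent level changed AND we're at a "top" boundary
--         # (dedent back to a lower level, or indent into a new scope)
--         if prev_indent is not None and cur_indent != prev_indent:
--             # Only split at dedents (end of a block) to avoid splitting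
--             # every indented line. Also split at significant indents (>=4 change)
--             if cur_indent < prev_indent or abs(cur_indent - prev_indent) >= 4:
--                 if start < idx:
--                     blocks.append((start, idx - 1))
--                 start = idx
--
--         prev_indent = cur_indent
--
--     # Final block
--     if start < len(lines):
--         blocks.append((start, len(lines) - 1))
--
--     return blocks or [(0, len(lines) - 1)]
-- ===== SOURCE B (Python) =====
-- def _is_sep(line: str) -> bool:
--     s = line.strip()
--     return s == "" or s == "..."
--
--
-- def _split_blocks_by_indent(lines: list[str]) -> list[tuple[int, int]]:
--     """Two-phase: partition lines into separator-free segments, then split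
--     each segment at dedents / >=4-space indent jumps."""
--     if not lines:
--         return [(0, 0)]
--
--     n = len(lines)
--     # Phase 1: maximal runs of non-separator lines, as (start index, run lines).
--     segments: list[tuple[int, list[str]]] = []
--     i = 0
--     while i < n:
--         if _is_sep(lines[i]):
--             i += 1
--         else:
--             j = i + 1
--             while j < n and not _is_sep(lines[j]):
--                 j += 1
--             segments.append((i, lines[i:j]))
--             i = j
--
--     # Phase 2: walk each segment, cutting where indentation drops or jumps by >=4.
--     blocks: list[tuple[int, int]] = []
--     for s, seg in segments:
--         start = s
--         prev = len(seg[0]) - len(seg[0].lstrip())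
--         for off in range(1, len(seg)):
--             cur = len(seg[off]) - len(seg[off].lstrip())
--             if cur < prev or cur - prev >= 4:
--                 blocks.append((start, s + off - 1))
--                 start = s + off
--             prev = cur
--         blocks.append((start, s + len(seg) - 1))
--
--     return blocks or [(0, n - 1)]
-- ===== Notes on version B (the rewrite author's own statement) =====
-- stated objective: alternative
-- what changed: Replaces A's single fold carrying (blocks, start, Optional prev) with a two-phase decomposition: first partition the lines into separator-free segments, then walk each segment with a plain integer indent baseline and cut at dedents or >=4 indent jumps.
import Mathlib
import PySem

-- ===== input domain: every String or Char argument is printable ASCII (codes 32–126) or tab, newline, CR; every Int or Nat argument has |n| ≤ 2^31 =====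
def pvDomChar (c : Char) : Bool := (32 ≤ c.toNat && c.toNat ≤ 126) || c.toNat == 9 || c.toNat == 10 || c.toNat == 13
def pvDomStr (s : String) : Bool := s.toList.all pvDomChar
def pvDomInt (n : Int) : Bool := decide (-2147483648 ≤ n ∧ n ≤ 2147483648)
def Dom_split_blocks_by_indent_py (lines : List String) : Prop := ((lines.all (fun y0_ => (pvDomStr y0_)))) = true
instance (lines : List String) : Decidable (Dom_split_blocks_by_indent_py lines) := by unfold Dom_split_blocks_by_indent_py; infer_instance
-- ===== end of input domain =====

-- B replaces A's single fold over (blocks, start, Optional prev) by a two-phase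
-- decomposition (partition into separator-free segments, then walk each segment);
-- same cost, alternative structure. Equivalence is proved for all inputs.

-- ===== PORT A =====

-- `line.strip() == "" or line.strip() == "..."` (the separator test both programs make)
def pvSep (line : String) : Bool :=
  PySem.Str.strip line == "" || PySem.Str.strip line == "..."

-- A's `_indent_level`
def pvIndentLevel (line : String) : Option Int :=
  let stripped := PySem.Str.lstrip line
  if stripped == "" then none
  else some ((PySem.Str.len line : Int) - (PySem.Str.len stripped : Int))

-- A's `for idx in range(len(lines))` loop; state = (blocks, start, prev_indent)
def pvALoop : List String → Int → (List (Int × Int) × Int × Option Int) → (List (Int × Int) × Int × Option Int)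
  | [], _, st => st
  | line :: rest, idx, (blocks, start, prev) =>
    if pvSep line then
      pvALoop rest (idx + 1) ((if start < idx then blocks ++ [(start, idx - 1)] else blocks), idx + 1, none)
    else
      match pvIndentLevel line with
      | none => pvALoop rest (idx + 1) (blocks, start, prev)   -- `continue`
      | some cur =>
        let st' :=
          match prev with
          | some p =>
            if cur ≠ p then
              if cur < p ∨ 4 ≤ |cur - p| then
                ((if start < idx then blocks ++ [(start, idx - 1)] else blocks), idx)
              else (blocks, start)
            else (blocks, start)
          | none => (blocks, start)
        pvALoop rest (idx + 1) (st'.1, st'.2, some cur)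

def split_blocks_by_indent_py (lines : List String) : List (Int × Int) :=
  match lines with
  | [] => [(0, 0)]
  | l0 :: _ =>
    let n : Int := (lines.length : Int)
    let res := pvALoop lines 0 ([], 0, pvIndentLevel l0)
    let blocks := if res.2.1 < n then res.1 ++ [(res.2.1, n - 1)] else res.1
    if blocks = [] then [(0, n - 1)] else blocks

-- ===== PORT B =====

-- `len(line) - len(line.lstrip())`
def pvIndentOf (line : String) : Int :=
  (PySem.Str.len line : Int) - (PySem.Str.len (PySem.Str.lstrip line) : Int)

-- B's inner `while j < n and not _is_sep(lines[j])`: length of the non-separator run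
def pvRun : List String → Nat
  | [] => 0
  | l :: rest => if pvSep l then 0 else pvRun rest + 1

-- B's phase 1 (outer while): (start index, run of lines) for each maximal non-separator run
def pvSegs : List String → Int → List (Int × List String)
  | [], _ => []
  | l :: rest, i =>
    if pvSep l then pvSegs rest (i + 1)
    else
      let k := pvRun rest + 1           -- j - i, scanning from j = i + 1
      (i, (l :: rest).take k) :: pvSegs ((l :: rest).drop k) (i + (k : Int))
  termination_by l _ => l.length
  decreasing_by
    all_goals simp [List.length_drop]

-- B's phase 2 inner `for off in range(1, len(seg))`; state = (blocks, start, prev, idx)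
def pvSegLoop : List String → (List (Int × Int) × Int × Int × Int) → (List (Int × Int) × Int × Int × Int)
  | [], st => st
  | line :: rest, (blocks, start, prev, idx) =>
    let cur := pvIndentOf line
    if cur < prev ∨ 4 ≤ cur - prev then
      pvSegLoop rest (blocks ++ [(start, idx - 1)], idx, cur, idx + 1)
    else
      pvSegLoop rest (blocks, start, cur, idx + 1)

-- B's per-segment body (`seg` is never empty when produced by phase 1)
def pvSegBlocks (s : Int) (seg : List String) : List (Int × Int) :=
  match seg with
  | [] => []
  | h :: tl =>
    let res := pvSegLoop tl ([], s, pvIndentOf h, s + 1)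
    res.1 ++ [(res.2.1, s + (seg.length : Int) - 1)]

def split_blocks_by_indent_py_alt (lines : List String) : List (Int × Int) :=
  if lines = [] then [(0, 0)]
  else
    let n : Int := (lines.length : Int)
    let segs := pvSegs lines 0
    let blocks := segs.foldl (fun acc p => acc ++ pvSegBlocks p.1 p.2) []
    if blocks = [] then [(0, n - 1)] else blocks

-- ===== PRECONDITION & SPEC =====
def Spec_split_blocks_by_indent_py (lines : List String) (out : List (Int × Int)) : Prop := out = split_blocks_by_indent_py_alt lines
instance (lines : List String) (out : List (Int × Int)) : Decidable (Spec_split_blocks_by_indent_py lines out) := by unfold Spec_split_blocks_by_indent_py; infer_instance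

-- ===== CLAIM (what is proved, stated in full; the proofs are below) =====
def Claim_equal_split_blocks_by_indent_py : Prop := ∀ (lines : List String), Dom_split_blocks_by_indent_py lines → Spec_split_blocks_by_indent_py lines (split_blocks_by_indent_py lines)

-- ===== LEMMAS AND PROOFS =====

-- A's loop followed by A's final-block append, as one function of the remaining suffix
def pvFin (rest : List String) (idx : Int) (st : List (Int × Int) × Int × Option Int) : List (Int × Int) :=
  let r := pvALoop rest idx st
  if r.2.1 < idx + (rest.length : Int) then r.1 ++ [(r.2.1, idx + (rest.length : Int) - 1)] else r.1

-- B's blocks for the suffix `rest` starting at absolute index i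
def pvBF (rest : List String) (i : Int) : List (Int × Int) :=
  ((pvSegs rest i).map (fun p => pvSegBlocks p.1 p.2)).flatten

lemma pvSep_of_lstrip_empty (l : String) (h : PySem.Str.lstrip l = "") : pvSep l = true := by
  have hl : PySem.Chars.lstrip l.toList = [] := by
    have h2 := congrArg String.toList h
    simpa using h2
  have hs : PySem.Str.strip l = "" := by
    simp [PySem.Str.strip, PySem.Chars.strip, PySem.Chars.rstrip, hl]
  simp [pvSep, hs]

lemma pvIndentLevel_of_not_sep (l : String) (h : pvSep l = false) :
    pvIndentLevel l = some (pvIndentOf l) := by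
  have hne : ¬ (PySem.Str.lstrip l = "") := by
    intro he
    have h2 := pvSep_of_lstrip_empty l he
    rw [h] at h2
    exact Bool.false_ne_true h2
  simp [pvIndentLevel, pvIndentOf, hne]

lemma pvRun_le_length (l : List String) : pvRun l ≤ l.length := by
  induction l with
  | nil => simp [pvRun]
  | cons a t ih =>
    by_cases h : pvSep a = true <;> simp [pvRun, h] <;> omega

lemma pvRun_take_nonsep : ∀ (l : List String), ∀ x ∈ l.take (pvRun l), pvSep x = false := by
  intro l
  induction l with
  | nil => simp [pvRun]
  | cons a t ih =>
    by_cases h : pvSep a = true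
    · simp [pvRun, h]
    · rw [pvRun, if_neg h, List.take_succ_cons]
      intro x hx
      rcases List.mem_cons.mp hx with rfl | hx'
      · simpa using h
      · exact ih x hx'

lemma pvRun_drop_head_sep : ∀ (l : List String), ∀ m r, l.drop (pvRun l) = m :: r → pvSep m = true := by
  intro l
  induction l with
  | nil => simp [pvRun]
  | cons a t ih =>
    by_cases h : pvSep a = true
    · rw [pvRun, if_pos h, List.drop_zero]
      rintro m r hmr
      cases hmr
      exact h
    · rw [pvRun, if_neg h, List.drop_succ_cons]
      exact ih

lemma pvSegLoop_append (l : List String) :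
    ∀ blocks s p idx, pvSegLoop l (blocks, s, p, idx)
      = (blocks ++ (pvSegLoop l ([], s, p, idx)).1, (pvSegLoop l ([], s, p, idx)).2) := by
  induction l with
  | nil => intro blocks s p idx; simp [pvSegLoop]
  | cons a t ih =>
    intro blocks s p idx
    by_cases h : pvIndentOf a < p ∨ 4 ≤ pvIndentOf a - p
    · simp only [pvSegLoop, h, if_true, List.nil_append]
      rw [ih (blocks ++ [(s, idx - 1)]), ih [(s, idx - 1)]]
      simp
    · simp only [pvSegLoop, h, if_false]
      exact ih blocks s (pvIndentOf a) (idx + 1)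

lemma pvFin_step (line : String) (rest : List String) (idx : Int)
    (st st' : List (Int × Int) × Int × Option Int)
    (h : pvALoop (line :: rest) idx st = pvALoop rest (idx + 1) st') :
    pvFin (line :: rest) idx st = pvFin rest (idx + 1) st' := by
  unfold pvFin
  rw [h]
  have harith : idx + ((line :: rest).length : Int) = (idx + 1) + (rest.length : Int) := by
    push_cast [List.length_cons]; ring
  rw [harith]

lemma pvBF_cons_sep (m : String) (r : List String) (i : Int) (hm : pvSep m = true) :
    pvBF (m :: r) i = pvBF r (i + 1) := by
  simp [pvBF, pvSegs, hm]

-- the in-segment correspondence (L2), with the main IH available for shorter suffixes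
lemma pvSegStep (N : Nat)
    (IH : ∀ rest : List String, rest.length ≤ N → ∀ (i : Int) blocks,
      pvFin rest i (blocks, i, none) = blocks ++ pvBF rest i) :
    ∀ seg rest'' : List String, rest''.length ≤ N + 1 →
      (∀ x ∈ seg, pvSep x = false) →
      (∀ m r, rest'' = m :: r → pvSep m = true) →
      ∀ (idx s p : Int) (blocks : List (Int × Int)), s < idx →
        pvFin (seg ++ rest'') idx (blocks, s, some p)
          = ((pvSegLoop seg (blocks, s, p, idx)).1
              ++ [((pvSegLoop seg (blocks, s, p, idx)).2.1, idx + (seg.length : Int) - 1)])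
            ++ pvBF rest'' (idx + (seg.length : Int)) := by
  intro seg
  induction seg with
  | nil =>
    intro rest'' hlen _ hrest idx s p blocks hs
    cases rest'' with
    | nil =>
      simp only [List.nil_append, List.length_nil, Nat.cast_zero, add_zero,
        pvFin, pvALoop, pvSegLoop, pvBF, pvSegs, List.map_nil, List.flatten_nil, List.append_nil]
      rw [if_pos hs]
    | cons m r =>
      have hm : pvSep m = true := hrest m r rfl
      have hA : pvALoop (m :: r) idx (blocks, s, some p)
          = pvALoop r (idx + 1) (blocks ++ [(s, idx - 1)], idx + 1, none) := by
        simp [pvALoop, hm, if_pos hs]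
      rw [List.nil_append, pvFin_step m r idx _ _ hA,
        IH r (by simpa using Nat.le_of_succ_le_succ (by simpa using hlen)) (idx + 1) _]
      simp only [pvSegLoop, List.length_nil, Nat.cast_zero, add_zero,
        pvBF_cons_sep m r idx hm]
  | cons c seg' ihseg =>
    intro rest'' hlen hseg hrest idx s p blocks hs
    have hc : pvSep c = false := hseg c (List.mem_cons_self ..)
    have hseg' : ∀ x ∈ seg', pvSep x = false := fun x hx => hseg x (List.mem_cons_of_mem _ hx)
    by_cases hb : pvIndentOf c < p ∨ 4 ≤ pvIndentOf c - p
    · have hne : pvIndentOf c ≠ p := by omega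
      have habs : pvIndentOf c < p ∨ 4 ≤ |pvIndentOf c - p| := by
        rcases hb with hb | hb
        · exact Or.inl hb
        · exact Or.inr (by rw [abs_of_nonneg (by omega)]; omega)
      have hA : pvALoop ((c :: seg') ++ rest'') idx (blocks, s, some p)
          = pvALoop (seg' ++ rest'') (idx + 1) (blocks ++ [(s, idx - 1)], idx, some (pvIndentOf c)) := by
        simp only [List.cons_append, pvALoop, hc, Bool.false_eq_true, if_false,
          pvIndentLevel_of_not_sep c hc]
        rw [if_pos hne, if_pos habs, if_pos hs]
      rw [show (c :: seg') ++ rest'' = c :: (seg' ++ rest'') from rfl] at hA ⊢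
      rw [pvFin_step c (seg' ++ rest'') idx _ _ hA,
        ihseg rest'' hlen hseg' hrest (idx + 1) idx (pvIndentOf c) (blocks ++ [(s, idx - 1)]) (by omega)]
      have hL : pvSegLoop (c :: seg') (blocks, s, p, idx)
          = pvSegLoop seg' (blocks ++ [(s, idx - 1)], idx, pvIndentOf c, idx + 1) := by
        simp [pvSegLoop, hb]
      rw [hL]
      have harith : (idx + 1) + (seg'.length : Int) = idx + ((c :: seg').length : Int) := by
        push_cast [List.length_cons]; ring
      rw [harith]
    · have hnb : ¬ (pvIndentOf c ≠ p ∧ (pvIndentOf c < p ∨ 4 ≤ |pvIndentOf c - p|)) := by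
        rintro ⟨hne, habs | habs⟩
        · exact hb (Or.inl habs)
        · rcases abs_cases (pvIndentOf c - p) with ⟨he, _⟩ | ⟨he, _⟩
          · exact hb (Or.inr (by omega))
          · exact hb (Or.inl (by omega))
      have hA : pvALoop ((c :: seg') ++ rest'') idx (blocks, s, some p)
          = pvALoop (seg' ++ rest'') (idx + 1) (blocks, s, some (pvIndentOf c)) := by
        simp only [List.cons_append, pvALoop, hc, Bool.false_eq_true, if_false,
          pvIndentLevel_of_not_sep c hc]
        by_cases hne : pvIndentOf c ≠ p
        · rw [if_pos hne, if_neg (fun habs => hnb ⟨hne, habs⟩)]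
        · rw [if_neg hne]
      rw [show (c :: seg') ++ rest'' = c :: (seg' ++ rest'') from rfl] at hA ⊢
      rw [pvFin_step c (seg' ++ rest'') idx _ _ hA,
        ihseg rest'' hlen hseg' hrest (idx + 1) s (pvIndentOf c) blocks (by omega)]
      have hL : pvSegLoop (c :: seg') (blocks, s, p, idx)
          = pvSegLoop seg' (blocks, s, pvIndentOf c, idx + 1) := by
        simp [pvSegLoop, hb]
      rw [hL]
      have harith : (idx + 1) + (seg'.length : Int) = idx + ((c :: seg').length : Int) := by
        push_cast [List.length_cons]; ring
      rw [harith]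

-- the main invariant (L1): from a fresh state, A's remainder equals B's blocks of the suffix
lemma pvMain : ∀ (N : Nat) (rest : List String), rest.length ≤ N →
    ∀ (i : Int) (blocks : List (Int × Int)),
      pvFin rest i (blocks, i, none) = blocks ++ pvBF rest i := by
  intro N
  induction N with
  | zero =>
    intro rest h i blocks
    have : rest = [] := List.length_eq_zero_iff.mp (Nat.le_zero.mp h)
    subst this
    simp [pvFin, pvALoop, pvBF, pvSegs]
  | succ N IH =>
    intro rest h i blocks
    cases rest with
    | nil => simp [pvFin, pvALoop, pvBF, pvSegs]
    | cons l rest' =>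
      have hlen' : rest'.length ≤ N := by simpa using Nat.le_of_succ_le_succ (by simpa using h)
      by_cases hl : pvSep l = true
      · have hA : pvALoop (l :: rest') i (blocks, i, none)
            = pvALoop rest' (i + 1) (blocks, i + 1, none) := by
          simp [pvALoop, hl]
        rw [pvFin_step l rest' i _ _ hA, IH rest' hlen' (i + 1) blocks,
          pvBF_cons_sep l rest' i hl]
      · have hsf : pvSep l = false := Bool.eq_false_iff.mpr hl
        have hA : pvALoop (l :: rest') i (blocks, i, none)
            = pvALoop rest' (i + 1) (blocks, i, some (pvIndentOf l)) := by
          simp [pvALoop, hsf, pvIndentLevel_of_not_sep l hsf]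
        rw [pvFin_step l rest' i _ _ hA]
        have hsplit : rest' = rest'.take (pvRun rest') ++ rest'.drop (pvRun rest') :=
          (List.take_append_drop _ _).symm
        rw [show pvFin rest' (i + 1) (blocks, i, some (pvIndentOf l))
            = pvFin (rest'.take (pvRun rest') ++ rest'.drop (pvRun rest')) (i + 1)
                (blocks, i, some (pvIndentOf l)) from by rw [← hsplit]]
        rw [pvSegStep N IH (rest'.take (pvRun rest')) (rest'.drop (pvRun rest'))
          (by simp; omega) (pvRun_take_nonsep rest') (pvRun_drop_head_sep rest')
          (i + 1) i (pvIndentOf l) blocks (by omega)]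
        -- now compute B's side for (l :: rest')
        have hk : (rest'.take (pvRun rest')).length = pvRun rest' := by
          simp [pvRun_le_length]
        have hBF : pvBF (l :: rest') i
            = pvSegBlocks i (l :: rest'.take (pvRun rest'))
              ++ pvBF (rest'.drop (pvRun rest')) (i + ((pvRun rest' + 1 : Nat) : Int)) := by
          rw [pvBF]
          rw [pvSegs]
          rw [if_neg (by simp [hsf])]
          simp only [List.take_succ_cons, List.drop_succ_cons, List.map_cons, List.flatten_cons]
          rfl
        rw [hBF, pvSegBlocks]
        rw [pvSegLoop_append (rest'.take (pvRun rest')) blocks i (pvIndentOf l) (i + 1)]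
        simp only [List.length_cons, hk]
        have h1 : (i + 1) + ((pvRun rest' : Nat) : Int) = i + ((pvRun rest' + 1 : Nat) : Int) := by
          push_cast; ring
        rw [h1]
        simp [List.append_assoc]

lemma pvFoldlBlocks (segs : List (Int × List String)) (acc : List (Int × Int)) :
    segs.foldl (fun acc p => acc ++ pvSegBlocks p.1 p.2) acc
      = acc ++ (segs.map (fun p => pvSegBlocks p.1 p.2)).flatten := by
  induction segs generalizing acc with
  | nil => simp
  | cons h t ih => simp [ih]

lemma pvInit (l0 : String) (r : List String) (blocks : List (Int × Int)) :
    pvALoop (l0 :: r) 0 (blocks, 0, pvIndentLevel l0)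
      = pvALoop (l0 :: r) 0 (blocks, 0, none) := by
  by_cases hs : pvSep l0 = true
  · simp [pvALoop, hs]
  · have hsf : pvSep l0 = false := Bool.eq_false_iff.mpr hs
    simp [pvALoop, hsf, pvIndentLevel_of_not_sep l0 hsf]

-- ===== VERDICT (by name: the statement is the Claim_ definition above) =====
theorem split_blocks_by_indent_py_spec : Claim_equal_split_blocks_by_indent_py := by
  intro lines _
  unfold Spec_split_blocks_by_indent_py
  cases lines with
  | nil => rfl
  | cons l0 r =>
    have hmain := pvMain (l0 :: r).length (l0 :: r) le_rfl 0 []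
    have hA : split_blocks_by_indent_py (l0 :: r)
        = (if pvFin (l0 :: r) 0 ([], 0, none) = []
            then [(0, (((l0 :: r).length : Nat) : Int) - 1)]
            else pvFin (l0 :: r) 0 ([], 0, none)) := by
      rw [split_blocks_by_indent_py]
      rw [pvFin, pvInit l0 r []]
      simp only [zero_add]
    have hB : split_blocks_by_indent_py_alt (l0 :: r)
        = (if pvBF (l0 :: r) 0 = []
            then [(0, (((l0 :: r).length : Nat) : Int) - 1)]
            else pvBF (l0 :: r) 0) := by
      rw [split_blocks_by_indent_py_alt, if_neg (List.cons_ne_nil l0 r)]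
      show (if List.foldl (fun acc p => acc ++ pvSegBlocks p.1 p.2) [] (pvSegs (l0 :: r) 0) = []
          then [(0, (((l0 :: r).length : Nat) : Int) - 1)]
          else List.foldl (fun acc p => acc ++ pvSegBlocks p.1 p.2) [] (pvSegs (l0 :: r) 0)) = _
      rw [pvFoldlBlocks (pvSegs (l0 :: r) 0) [], List.nil_append]
      rfl
    rw [hA, hB, hmain, List.nil_append]
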